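-- pv_equiv track=rewrite | github.com/guinb0/ouvidoria-pwa | presidio-service/pii_classifier.py | _is_near
-- ===== SOURCE A (Python) =====
-- from typing import List, Dict, Any
--
-- def _is_near(
--
--     group_a: List[Dict],
--     group_b: List[Dict],
--     max_distance: int
-- ) -> bool:
--     """Verifica se há alguma entidade de group_b próxima de group_a."""
--     for ent_a in group_a:
--         for ent_b in group_b:
--             # Suporta ambos formatos de posição
--             start_a = ent_a.get('start') or ent_a.get('inicio', 0)
--             start_b = ent_b.get('start') or ent_b.get('inicio', 0)
--             distance = abs(start_a - start_b)
--             if distance <= max_distance: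
--                 return True
--     return False
-- ===== SOURCE B (Python) =====
-- def _is_near(group_a, group_b, max_distance):
--     """Sorted two-pointer sweep: any start of group_a within max_distance of a start of group_b."""
--     def _start(ent):
--         return ent.get('start') or ent.get('inicio', 0)
--     xs = sorted(_start(e) for e in group_a)
--     ys = sorted(_start(e) for e in group_b)
--     i = 0
--     j = 0
--     while i < len(xs) and j < len(ys):
--         if abs(xs[i] - ys[j]) <= max_distance:
--             return True
--         if xs[i] < ys[j]:
--             i += 1
--         else:
--             j += 1
--     return False
-- ===== Notes on version B (the rewrite author's own statement) =====
-- stated objective: alternative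
-- what changed: Replaced the nested all-pairs scan by sorting both groups' start positions and running a single two-pointer sweep that finds a pair within max_distance iff one exists.
import Mathlib
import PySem

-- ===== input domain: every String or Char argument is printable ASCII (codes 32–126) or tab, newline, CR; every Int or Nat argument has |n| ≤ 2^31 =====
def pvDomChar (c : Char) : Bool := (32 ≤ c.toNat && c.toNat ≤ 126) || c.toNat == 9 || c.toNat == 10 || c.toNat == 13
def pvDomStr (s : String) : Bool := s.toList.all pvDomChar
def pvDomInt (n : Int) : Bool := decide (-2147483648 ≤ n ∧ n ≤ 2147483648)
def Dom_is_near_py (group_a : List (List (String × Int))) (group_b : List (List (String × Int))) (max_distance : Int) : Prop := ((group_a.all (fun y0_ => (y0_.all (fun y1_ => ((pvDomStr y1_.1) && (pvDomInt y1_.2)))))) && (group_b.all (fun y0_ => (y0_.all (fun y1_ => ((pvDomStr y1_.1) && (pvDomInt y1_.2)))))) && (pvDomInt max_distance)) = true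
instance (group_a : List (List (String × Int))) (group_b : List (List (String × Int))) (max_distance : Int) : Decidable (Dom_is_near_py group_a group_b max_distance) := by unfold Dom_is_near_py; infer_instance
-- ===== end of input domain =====

-- B replaces A's nested all-pairs scan by sorting both groups' starts and a single two-pointer sweep (alternative algorithm).

-- ===== PORT A =====
-- ent.get('start') or ent.get('inicio', 0)  — Python `or`: falls through when get('start') is None or 0
def entStart (ent : List (String × Int)) : Int :=
  match (PySem.Dict.mk ent).get? "start" with
  | some v => if v ≠ 0 then v else (PySem.Dict.mk ent).getD "inicio" 0
  | none => (PySem.Dict.mk ent).getD "inicio" 0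

def is_near_py (group_a : List (List (String × Int))) (group_b : List (List (String × Int))) (max_distance : Int) : Bool :=
  -- nested for-loops with early `return True` = any of any
  group_a.any (fun ent_a =>
    group_b.any (fun ent_b =>
      decide (|entStart ent_a - entStart ent_b| ≤ max_distance)))

-- ===== PORT B =====
-- the while-loop of Source B, recursing on the two sorted lists from the front (i/j advances = dropping heads)
def sweepNear (max_distance : Int) : List Int → List Int → Bool
  | x :: xs, y :: ys =>
    if |x - y| ≤ max_distance then true
    else if x < y then sweepNear max_distance xs (y :: ys)
    else sweepNear max_distance (x :: xs) ys
  | _, _ => false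
termination_by xs ys => xs.length + ys.length

def is_near_py_alt (group_a : List (List (String × Int))) (group_b : List (List (String × Int))) (max_distance : Int) : Bool :=
  sweepNear max_distance
    (PySem.List.sorted (group_a.map entStart) (fun x => x) false)
    (PySem.List.sorted (group_b.map entStart) (fun x => x) false)

-- ===== PRECONDITION & SPEC =====
def Spec_is_near_py (group_a : List (List (String × Int))) (group_b : List (List (String × Int))) (max_distance : Int) (out : Bool) : Prop := out = is_near_py_alt group_a group_b max_distance
instance (group_a : List (List (String × Int))) (group_b : List (List (String × Int))) (max_distance : Int) (out : Bool) : Decidable (Spec_is_near_py group_a group_b max_distance out) := by unfold Spec_is_near_py; infer_instance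

-- ===== CLAIM (what is proved, stated in full; the proofs are below) =====
def Claim_equal_is_near_py : Prop := ∀ (group_a : List (List (String × Int))) (group_b : List (List (String × Int))) (max_distance : Int), Dom_is_near_py group_a group_b max_distance → Spec_is_near_py group_a group_b max_distance (is_near_py group_a group_b max_distance)

-- ===== LEMMAS AND PROOFS =====

-- On sorted lists, the sweep returns true iff some pair is within max_distance.
theorem sweepNear_iff (d : Int) (xs ys : List Int) :
    xs.Pairwise (· ≤ ·) → ys.Pairwise (· ≤ ·) →
    (sweepNear d xs ys = true ↔ ∃ x ∈ xs, ∃ y ∈ ys, |x - y| ≤ d) := by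
  induction xs, ys using sweepNear.induct d with
  | case1 x xs y ys hnear =>
      intro _ _
      simp only [sweepNear, hnear, if_true, true_iff]
      exact ⟨x, List.mem_cons_self .., y, List.mem_cons_self .., hnear⟩
  | case2 x xs y ys hnear hlt ih =>
      intro hx hy
      rw [sweepNear]
      simp only [hnear, if_false, hlt, if_true]
      rw [ih hx.of_cons hy]
      constructor
      · rintro ⟨x', hx', y', hy', h⟩
        exact ⟨x', List.mem_cons_of_mem _ hx', y', hy', h⟩
      · rintro ⟨x', hx', y', hy', h⟩
        rcases List.mem_cons.mp hx' with heq | hx'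
        · -- x' = x : every y' ∈ y :: ys has y ≤ y', so |x - y'| ≥ y' - x ≥ y - x > d
          exfalso
          have hyy' : y ≤ y' := by
            rcases List.mem_cons.mp hy' with heq' | hmem
            · omega
            · exact (List.pairwise_cons.mp hy).1 _ hmem
          have hnd : ¬ (y - x ≤ d) := by
            intro hc; exact hnear (by rw [abs_sub_comm, abs_of_nonneg (by omega)]; exact hc)
          have habs : y' - x' ≤ |x' - y'| := by
            rcases abs_cases ((x' : Int) - y') with ⟨he, _⟩ | ⟨he, _⟩ <;> omega
          omega
        · exact ⟨x', hx', y', hy', h⟩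
  | case3 x xs y ys hnear hlt ih =>
      intro hx hy
      rw [sweepNear]
      simp only [hnear, if_false, hlt, if_false]
      rw [ih hx hy.of_cons]
      constructor
      · rintro ⟨x', hx', y', hy', h⟩
        exact ⟨x', hx', y', List.mem_cons_of_mem _ hy', h⟩
      · rintro ⟨x', hx', y', hy', h⟩
        rcases List.mem_cons.mp hy' with heq | hy'
        · exfalso
          have hxx' : x ≤ x' := by
            rcases List.mem_cons.mp hx' with heq' | hmem
            · omega
            · exact (List.pairwise_cons.mp hx).1 _ hmem
          have hnd : ¬ (x - y ≤ d) := by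
            intro hc; exact hnear (by rw [abs_of_nonneg (by omega)]; exact hc)
          have habs : x' - y' ≤ |x' - y'| := le_abs_self _
          omega
        · exact ⟨x', hx', y', hy', h⟩
  | case4 xs ys h =>
      intro _ _
      cases xs with
      | nil => simp [sweepNear]
      | cons a as =>
        cases ys with
        | nil => simp [sweepNear]
        | cons b bs => exact (h a as b bs rfl rfl).elim

theorem is_near_py_eq (group_a group_b : List (List (String × Int))) (max_distance : Int) :
    is_near_py group_a group_b max_distance = is_near_py_alt group_a group_b max_distance := by
  rw [Bool.eq_iff_iff]
  unfold is_near_py is_near_py_alt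
  rw [sweepNear_iff _ _ _
        (PySem.List.sorted_pairwise (group_a.map entStart) (fun x => x))
        (PySem.List.sorted_pairwise (group_b.map entStart) (fun x => x))]
  simp [PySem.List.mem_sorted, List.any_eq_true]

-- ===== VERDICT (by name: the statement is the Claim_ definition above) =====
theorem is_near_py_spec : Claim_equal_is_near_py := by
  intro ga gb d _
  exact is_near_py_eq ga gb d
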